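-- pv_equiv track=rewrite | github.com/thu-spmi/JSA-KRTOD | main.py | get_xspn
-- ===== SOURCE A (Python) =====
-- def get_xspn(input_tensor,eos_id,sep_id,sos_id = None):
--     if not isinstance(input_tensor, list):
--         input_batch=input_tensor.cpu().tolist()
--     else:
--         input_batch=input_tensor
--     xspn_gen=[]
--     for i ,xspn in enumerate(input_batch):
--         if eos_id in xspn:
--             xspn = xspn[:xspn.index(eos_id)+1]
--         else:
--             xspn[-1]=eos_id
--         if sos_id:
--             if sos_id in xspn:
--                 xspn = xspn[xspn.index(sos_id)+1:] # multi sos_id not dealt with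
--                 if sos_id in xspn:
--                     xspn = xspn[xspn.index(sos_id)+1:]
--         xspn_new=[]
--         for token in xspn:
--             if token!=sep_id:
--                 xspn_new.append(token)
--         xspn_gen.append(xspn_new)
--     return xspn_gen
-- ===== SOURCE B (Python) =====
-- def get_xspn(input_tensor, eos_id, sep_id, sos_id=None):
--     if not isinstance(input_tensor, list):
--         input_batch = input_tensor.cpu().tolist()
--     else:
--         input_batch = input_tensor
--     xspn_gen = []
--     for xspn in input_batch:
--         if eos_id in xspn:
--             xspn = xspn[:xspn.index(eos_id) + 1]
--         else:
--             xspn[-1] = eos_id  # same in-place mutation as the original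
--         out = []
--         sos_count = 0
--         for token in xspn:
--             if sos_id and token == sos_id and sos_count < 2:
--                 out = []
--                 sos_count += 1
--             elif token != sep_id:
--                 out.append(token)
--         xspn_gen.append(out)
--     return xspn_gen
-- ===== Notes on version B (the rewrite author's own statement) =====
-- stated objective: simpler
-- what changed: Replaced the two .index-based sos slices and the separate sep-filter loop by a single forward pass over the eos-trimmed sequence that keeps a sos counter (reset output at the first two sos tokens, append non-sep tokens); the eos-trim block, including the in-place xspn[-1]=eos_id mutation, is kept.
import Mathlib
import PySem

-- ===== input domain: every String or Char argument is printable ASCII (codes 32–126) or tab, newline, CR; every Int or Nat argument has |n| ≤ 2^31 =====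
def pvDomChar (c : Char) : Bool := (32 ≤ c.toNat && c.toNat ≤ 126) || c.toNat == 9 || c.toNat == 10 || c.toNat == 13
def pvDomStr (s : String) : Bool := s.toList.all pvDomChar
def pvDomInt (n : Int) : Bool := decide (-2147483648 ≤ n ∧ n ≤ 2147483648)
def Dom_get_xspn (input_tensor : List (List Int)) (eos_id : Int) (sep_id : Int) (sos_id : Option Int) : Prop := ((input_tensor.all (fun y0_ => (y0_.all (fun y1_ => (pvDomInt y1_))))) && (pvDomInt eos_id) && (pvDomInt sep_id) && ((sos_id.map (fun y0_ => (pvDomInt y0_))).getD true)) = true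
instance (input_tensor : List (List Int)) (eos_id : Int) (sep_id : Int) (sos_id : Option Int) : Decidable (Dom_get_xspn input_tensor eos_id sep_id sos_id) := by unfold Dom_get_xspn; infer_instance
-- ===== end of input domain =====

-- B replaces A's two `.index`-based sos slices and the sep-filter loop by one forward pass
-- keeping a sos counter (objective: simpler).  Both A and B mutate a row in place
-- (`xspn[-1] = eos_id`) when eos is absent, identically; the equivalence proved here is about
-- the return value.

-- ===== PORT A =====
-- Python truthiness of the optional sos_id (None and 0 are falsy)
def pyTruthy (o : Option Int) : Bool :=
  match o with
  | none => false
  | some s => s != 0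

def getXspnRowA (eos_id sep_id : Int) (sos_id : Option Int) (xspn0 : List Int) : List Int :=
  -- `if eos_id in xspn: xspn = xspn[:xspn.index(eos_id)+1] else: xspn[-1] = eos_id`
  -- (the else branch needs a nonempty row: Pre_ excludes empty rows, where Python raises IndexError)
  let xspn1 :=
    match PySem.List.index? xspn0 eos_id with
    | some i => PySem.List.slice xspn0 none (some ((i : Int) + 1))
    | none => xspn0.dropLast ++ [eos_id]
  let xspn2 :=
    if pyTruthy sos_id then
      let s := sos_id.getD 0
      match PySem.List.index? xspn1 s with
      | some i =>
        let x := PySem.List.slice xspn1 (some ((i : Int) + 1)) none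
        match PySem.List.index? x s with
        | some j => PySem.List.slice x (some ((j : Int) + 1)) none
        | none => x
      | none => xspn1
    else xspn1
  xspn2.foldl (fun acc token => if token != sep_id then acc ++ [token] else acc) []

def get_xspn (input_tensor : List (List Int)) (eos_id : Int) (sep_id : Int) (sos_id : Option Int) : List (List Int) :=
  input_tensor.foldl (fun xspn_gen xspn => xspn_gen ++ [getXspnRowA eos_id sep_id sos_id xspn]) []

-- ===== PORT B =====
-- the single forward pass of Source B: state = (remaining tokens, sos_count, out)
def getXspnLoopB (sep_id : Int) (sosT : Bool) (s : Int) : List Int → Nat → List Int → List Int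
  | [], _, out => out
  | token :: rest, c, out =>
    if sosT && token == s && decide (c < 2) then
      getXspnLoopB sep_id sosT s rest (c + 1) []
    else
      getXspnLoopB sep_id sosT s rest c (if token != sep_id then out ++ [token] else out)

def getXspnRowB (eos_id sep_id : Int) (sos_id : Option Int) (xspn0 : List Int) : List Int :=
  let xspn :=
    match PySem.List.index? xspn0 eos_id with
    | some i => PySem.List.slice xspn0 none (some ((i : Int) + 1))
    | none => xspn0.dropLast ++ [eos_id]
  getXspnLoopB sep_id (pyTruthy sos_id) (sos_id.getD 0) xspn 0 []

def get_xspn_alt (input_tensor : List (List Int)) (eos_id : Int) (sep_id : Int) (sos_id : Option Int) : List (List Int) :=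
  input_tensor.map (getXspnRowB eos_id sep_id sos_id)

-- ===== PRECONDITION & SPEC =====
-- Pre_ excludes inputs containing an empty row: there `xspn[-1] = eos_id` raises IndexError in
-- both A and B (an empty row can never contain eos_id).
def Pre_get_xspn (input_tensor : List (List Int)) (eos_id : Int) (sep_id : Int) (sos_id : Option Int) : Prop :=
  ∀ xs ∈ input_tensor, xs ≠ []
instance (input_tensor : List (List Int)) (eos_id : Int) (sep_id : Int) (sos_id : Option Int) : Decidable (Pre_get_xspn input_tensor eos_id sep_id sos_id) := by unfold Pre_get_xspn; infer_instance

def pvWitness_get_xspn : List (List Int) × Int × Int × Option Int := ([[1, 2, 9, 4], [3, 0, 5]], 9, 0, some 3)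

def Spec_get_xspn (input_tensor : List (List Int)) (eos_id : Int) (sep_id : Int) (sos_id : Option Int) (out : List (List Int)) : Prop := out = get_xspn_alt input_tensor eos_id sep_id sos_id
instance (input_tensor : List (List Int)) (eos_id : Int) (sep_id : Int) (sos_id : Option Int) (out : List (List Int)) : Decidable (Spec_get_xspn input_tensor eos_id sep_id sos_id out) := by unfold Spec_get_xspn; infer_instance

-- ===== CLAIM (what is proved, stated in full; the proofs are below) =====
def Claim_equal_get_xspn : Prop := ∀ (input_tensor : List (List Int)) (eos_id : Int) (sep_id : Int) (sos_id : Option Int), Dom_get_xspn input_tensor eos_id sep_id sos_id → Pre_get_xspn input_tensor eos_id sep_id sos_id → Spec_get_xspn input_tensor eos_id sep_id sos_id (get_xspn input_tensor eos_id sep_id sos_id)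

-- ===== LEMMAS AND PROOFS =====

-- A's sep filter is List.filter
theorem filtA_eq (sep_id : Int) (ys acc : List Int) :
    ys.foldl (fun acc token => if token != sep_id then acc ++ [token] else acc) acc
      = acc ++ ys.filter (fun t => t != sep_id) := by
  induction ys generalizing acc with
  | nil => simp
  | cons t r ih =>
    simp only [List.foldl_cons, List.filter_cons]
    by_cases h : (t != sep_id) = true
    · rw [if_pos h, ih, if_pos h]; simp
    · rw [if_neg h, ih, if_neg h]

-- B's loop when no (further) stripping can happen: it just filters out sep
theorem loopB_no_strip (sep_id : Int) (sosT : Bool) (s : Int) (ys : List Int) (c : Nat)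
    (out : List Int) (h : sosT = false ∨ 2 ≤ c ∨ s ∉ ys) :
    getXspnLoopB sep_id sosT s ys c out = out ++ ys.filter (fun t => t != sep_id) := by
  induction ys generalizing out with
  | nil => simp [getXspnLoopB]
  | cons t r ih =>
    have hcond : (sosT && t == s && decide (c < 2)) = false := by
      rcases h with h | h | h
      · simp [h]
      · simp [Nat.not_lt.mpr h]
      · have : (t == s) = false := by
          simp only [beq_eq_false_iff_ne]; rintro rfl; exact h (List.mem_cons_self ..)
        simp [this]
    have h' : sosT = false ∨ 2 ≤ c ∨ s ∉ r := by
      rcases h with h | h | h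
      · exact Or.inl h
      · exact Or.inr (Or.inl h)
      · exact Or.inr (Or.inr fun hm => h (List.mem_cons_of_mem _ hm))
    simp only [getXspnLoopB, hcond, Bool.false_eq_true, if_false, ih _ h', List.filter_cons]
    by_cases ht : (t != sep_id) = true
    · rw [if_pos ht, if_pos ht]; simp
    · rw [if_neg ht, if_neg ht]

-- B's loop across the first remaining sos token: it restarts just after it
theorem loopB_strip (sep_id s : Int) (pre suf : List Int) (c : Nat) (out : List Int)
    (hpre : s ∉ pre) (hc : c < 2) :
    getXspnLoopB sep_id true s (pre ++ s :: suf) c out = getXspnLoopB sep_id true s suf (c + 1) [] := by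
  induction pre generalizing out with
  | nil => simp [getXspnLoopB, hc]
  | cons t pre' ih =>
    have ht : (t == s) = false := by
      simp only [beq_eq_false_iff_ne]; rintro rfl; exact hpre (List.mem_cons_self ..)
    have hcond : (true && t == s && decide (c < 2)) = false := by simp [ht]
    simp only [List.cons_append, getXspnLoopB, hcond, Bool.false_eq_true, if_false]
    exact ih _ (fun hm => hpre (List.mem_cons_of_mem _ hm))

-- slicing from index i + 1 of pre ++ v :: suf with pre.length = i is suf
theorem slice_from_succ (v : Int) (pre suf : List Int) :
    PySem.List.slice (pre ++ v :: suf) (some ((pre.length : Int) + 1)) none = suf := by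
  have h1 : ((pre.length : Int) + 1) = ((pre.length + 1 : Nat) : Int) := by push_cast; ring
  have h2 : pre ++ v :: suf = (pre ++ [v]) ++ suf := by simp
  rw [h1, PySem.List.slice_from_natCast, h2]
  simpa using List.drop_left (l₁ := pre ++ [v]) (l₂ := suf)

-- row-wise equality
theorem row_eq (eos_id sep_id : Int) (sos_id : Option Int) (xspn0 : List Int) :
    getXspnRowA eos_id sep_id sos_id xspn0 = getXspnRowB eos_id sep_id sos_id xspn0 := by
  unfold getXspnRowA getXspnRowB
  -- the eos-trim step is the identical term in both ports
  generalize (match PySem.List.index? xspn0 eos_id with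
    | some i => PySem.List.slice xspn0 none (some ((i : Int) + 1))
    | none => xspn0.dropLast ++ [eos_id]) = ys
  by_cases hT : pyTruthy sos_id
  case neg =>
    rw [Bool.not_eq_true] at hT
    simp only [hT, Bool.false_eq_true, if_false]
    rw [loopB_no_strip _ _ _ _ _ _ (Or.inl rfl), filtA_eq]
  case pos =>
    simp only [hT, if_true]
    set s := sos_id.getD 0 with hs
    rcases h1 : PySem.List.index? ys s with _ | i
    · -- sos not in the trimmed row
      rw [loopB_no_strip _ _ _ _ _ _
          (Or.inr (Or.inr ((PySem.List.index?_eq_none_iff _ _).mp h1))), filtA_eq]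
    · obtain ⟨pre, suf, rfl, hlen, hpre⟩ := (PySem.List.index?_eq_some_iff _ _ _).mp h1
      subst hlen
      simp only [slice_from_succ]
      rw [loopB_strip _ _ _ _ _ _ hpre (by omega)]
      rcases h2 : PySem.List.index? suf s with _ | j
      · rw [loopB_no_strip _ _ _ _ _ _
            (Or.inr (Or.inr ((PySem.List.index?_eq_none_iff _ _).mp h2))), filtA_eq]
      · obtain ⟨pre2, suf2, rfl, hlen2, hpre2⟩ := (PySem.List.index?_eq_some_iff _ _ _).mp h2
        subst hlen2
        simp only [slice_from_succ]
        rw [loopB_strip _ _ _ _ _ _ hpre2 (by omega),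
          loopB_no_strip _ _ _ _ _ _ (Or.inr (Or.inl (by omega))), filtA_eq]

-- A's result-list building loop is a map
theorem foldl_app_map (f : List Int → List Int) (l acc : List (List Int)) :
    l.foldl (fun g x => g ++ [f x]) acc = acc ++ l.map f := by
  induction l generalizing acc with
  | nil => simp
  | cons x r ih => simp [ih]

-- ===== VERDICT (by name: the statement is the Claim_ definition above) =====
theorem get_xspn_spec : Claim_equal_get_xspn := by
  intro input_tensor eos_id sep_id sos_id _ _
  unfold Spec_get_xspn get_xspn get_xspn_alt
  rw [foldl_app_map (getXspnRowA eos_id sep_id sos_id)]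
  simp [row_eq]
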